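-- pv_equiv track=rewrite | github.com/vaishnaviborekar16/Python_basics | python_work/assignment_day2/binaryarray_subarray.py | count_subarrays_with_one_one
-- ===== SOURCE A (Python) =====
-- def count_subarrays_with_one_one(arr):
--     """
--     Counts the number of ways to divide a binary array into sub-arrays
--     such that each sub-array contains exactly one 1.
--
--     """
--
--     if not arr or arr.count(1) == 0:
--         return 0
--
--     prev_one = -1  # Index of the previous 1
--     ways = 1  # Initial ways to divide
--
--     for i in range(len(arr)):
--         if arr[i] == 1:
--             if prev_one != -1:
--                 ways *= (i - prev_one)  # Multiply ways by the number of possible splits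
--             prev_one = i
--
--     return ways
-- ===== SOURCE B (Python) =====
-- def count_subarrays_with_one_one(arr):
--     # Dynamic programming over prefixes: ones[i] = number of 1s in arr[:i];
--     # dp[i] = number of ways to split arr[:i] into blocks each holding exactly one 1.
--     ones = [0]
--     for x in arr:
--         ones.append(ones[-1] + (1 if x == 1 else 0))
--     if ones[-1] == 0:
--         return 0
--     dp = [1]
--     for i in range(1, len(arr) + 1):
--         dp.append(sum(dp[j] for j in range(i) if ones[i] - ones[j] == 1))
--     return dp[-1]
-- ===== Notes on version B (the rewrite author's own statement) =====
-- stated objective: alternative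
-- what changed: Replaces A's single-pass gap-product loop (tracking the previous 1 and multiplying in each gap) by a dynamic programming over prefixes: a prefix-count-of-ones table, then dp[i] = sum of dp[j] over all j whose block arr[j:i] contains exactly one 1, answering dp[n]; B trades A's O(n) product for an O(n^2) summation recurrence.
import Mathlib
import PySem

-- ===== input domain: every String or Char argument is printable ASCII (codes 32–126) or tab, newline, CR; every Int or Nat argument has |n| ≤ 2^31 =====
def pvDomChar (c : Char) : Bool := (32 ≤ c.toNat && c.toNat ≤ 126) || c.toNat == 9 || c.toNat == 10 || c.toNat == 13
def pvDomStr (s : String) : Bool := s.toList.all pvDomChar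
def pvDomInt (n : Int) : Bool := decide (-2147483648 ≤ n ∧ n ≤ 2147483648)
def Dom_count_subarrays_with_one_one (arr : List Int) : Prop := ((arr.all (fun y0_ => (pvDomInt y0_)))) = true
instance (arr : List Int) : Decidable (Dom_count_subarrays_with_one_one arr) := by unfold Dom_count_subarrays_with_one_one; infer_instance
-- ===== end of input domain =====

-- B replaces A's gap-product loop by a prefix-count dynamic programming: dp[i] sums dp[j] over splits whose last block arr[j:i] holds exactly one 1; objective: alternative (O(n^2) vs A's O(n), genuinely different algorithm).


-- ===== PORT A =====
def count_subarrays_with_one_one (arr : List Int) : Int :=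
  if arr = [] ∨ PySem.List.count arr 1 = 0 then 0
  else
    (((PySem.List.pyRange 0 (PySem.List.len arr) 1).foldl
      (fun (st : Int × Int) i =>
        if PySem.List.pyGetD arr i 0 == 1 then
          (i, if st.1 ≠ -1 then st.2 * (i - st.1) else st.2)
        else st) (-1, 1)).2)

-- ===== PORT B =====
-- ones[-1] / dp[-1] reads use pyGetD: both lists are provably nonempty, so the default is never taken (exact).
def count_subarrays_with_one_one_alt (arr : List Int) : Int :=
  let ones := arr.foldl
    (fun o x => o ++ [PySem.List.pyGetD o (-1) 0 + (if x == 1 then (1:Int) else 0)]) [(0:Int)]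
  if PySem.List.pyGetD ones (-1) 0 == 0 then 0
  else
    let dp := (PySem.List.pyRange 1 (PySem.List.len arr + 1) 1).foldl
      (fun dp i => dp ++ [(PySem.List.pyRange 0 i 1).foldl
        (fun s j =>
          if (PySem.List.pyGetD ones i 0 - PySem.List.pyGetD ones j 0) == 1 then
            s + PySem.List.pyGetD dp j 0
          else s) 0])
      [(1:Int)]
    PySem.List.pyGetD dp (-1) 0

-- ===== PRECONDITION & SPEC =====
def Spec_count_subarrays_with_one_one (arr : List Int) (out : Int) : Prop := out = count_subarrays_with_one_one_alt arr
instance (arr : List Int) (out : Int) : Decidable (Spec_count_subarrays_with_one_one arr out) := by unfold Spec_count_subarrays_with_one_one; infer_instance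

-- ===== CLAIM (what is proved, stated in full; the proofs are below) =====
def Claim_equal_count_subarrays_with_one_one : Prop := ∀ (arr : List Int), Dom_count_subarrays_with_one_one arr → Spec_count_subarrays_with_one_one arr (count_subarrays_with_one_one arr)

-- ===== LEMMAS AND PROOFS =====

-- A's loop step over (index, value) pairs
def pvStepA (st : Int × Int) (p : Int × Int) : Int × Int :=
  if p.2 == 1 then (p.1, if st.1 ≠ -1 then st.2 * (p.1 - st.1) else st.2) else st

-- A's state after the first m elements
def pvAst (arr : List Int) (m : Nat) : Int × Int :=
  ((PySem.List.enumerate arr).take m).foldl pvStepA (-1, 1)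

-- number of 1s among the first i elements
def pvCnt (arr : List Int) (i : Nat) : Int := ((arr.take i).count 1 : Int)

def pvF (c x : Int) : Int := c + (if x == 1 then (1:Int) else 0)

def pvOnes (arr : List Int) : List Int := arr.scanl pvF 0

-- B's inner sum and dp list
def pvInner (ones dp : List Int) (i : Int) : Int :=
  (PySem.List.pyRange 0 i 1).foldl
    (fun s j =>
      if (PySem.List.pyGetD ones i 0 - PySem.List.pyGetD ones j 0) == 1 then
        s + PySem.List.pyGetD dp j 0
      else s) 0

def pvDpF (ones : List Int) (m : Nat) : List Int :=
  (PySem.List.pyRange 1 ((m:Int)+1) 1).foldl (fun dp i => dp ++ [pvInner ones dp i]) [(1:Int)]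

-- band sum: Σ_{j<i, pvCnt arr j = v} dp[j]
def pvBand (arr dp : List Int) (i : Nat) (v : Int) : Int :=
  ((List.range i).map (fun j => if pvCnt arr j = v then dp.getD j 0 else 0)).sum

theorem pvOnesFold (l : List Int) : ∀ (ys : List Int) (c : Int),
    l.foldl (fun o x => o ++ [PySem.List.pyGetD o (-1) 0 + (if x == 1 then (1:Int) else 0)]) (ys ++ [c])
    = ys ++ l.scanl pvF c := by
  induction l with
  | nil => intro ys c; simp [List.scanl]
  | cons x l ih =>
    intro ys c
    rw [List.foldl_cons, PySem.List.pyGetD_neg_one_append_singleton]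
    have : (ys ++ [c]) ++ [c + (if x == 1 then (1:Int) else 0)] = (ys ++ [c]) ++ [pvF c x] := by
      simp [pvF]
    rw [this, ih (ys ++ [c]) (pvF c x)]
    simp [List.scanl]

theorem pvScanlGetD (l : List Int) : ∀ (c : Int) (k : Nat), k ≤ l.length →
    (l.scanl pvF c).getD k 0 = c + ((l.take k).count 1 : Int) := by
  induction l with
  | nil =>
    intro c k hk
    have hk0 : k = 0 := by simp at hk; omega
    subst hk0
    simp [List.scanl]
  | cons x l ih =>
    intro c k hk
    match k with
    | 0 => simp [List.scanl_cons]
    | (k+1) =>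
      rw [List.scanl_cons]
      simp only [List.getD_cons_succ]
      rw [ih (pvF c x) k (by simpa using hk)]
      simp only [List.take_succ_cons, List.count_cons, pvF]
      by_cases hx : x = 1 <;> simp [hx] <;> push_cast <;> ring

theorem pvOnes_getD (arr : List Int) (k : Nat) (hk : k ≤ arr.length) :
    (pvOnes arr).getD k 0 = pvCnt arr k := by
  rw [pvOnes, pvScanlGetD arr 0 k hk, pvCnt]; ring

theorem pvOnes_length (arr : List Int) : (pvOnes arr).length = arr.length + 1 := by
  simp [pvOnes]

theorem pvOnes_ne_nil (arr : List Int) : pvOnes arr ≠ [] := by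
  intro h
  have := pvOnes_length arr
  rw [h] at this
  simp at this

theorem pvOnes_last (arr : List Int) :
    PySem.List.pyGetD (pvOnes arr) (-1) 0 = pvCnt arr arr.length := by
  have hlen : arr.length < (pvOnes arr).length := by rw [pvOnes_length]; omega
  rw [PySem.List.pyGetD_neg_one (pvOnes arr) 0 (pvOnes_ne_nil arr),
    List.getLast_eq_getElem, ← pvOnes_getD arr arr.length (le_refl _),
    List.getD_eq_getElem _ _ hlen]
  congr 1
  rw [pvOnes_length]
  omega

theorem pvCnt_nonneg (arr : List Int) (i : Nat) : 0 ≤ pvCnt arr i := by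
  simp [pvCnt]

theorem pvCnt_mono (arr : List Int) {i j : Nat} (h : i ≤ j) : pvCnt arr i ≤ pvCnt arr j := by
  have h1 : arr.take i = (arr.take j).take i := by rw [List.take_take, Nat.min_eq_left h]
  have h2 : List.Sublist ((arr.take j).take i) (arr.take j) := List.take_sublist ..
  rw [pvCnt, pvCnt, h1]
  exact_mod_cast h2.count_le 1

theorem pvCnt_succ (arr : List Int) (m : Nat) (hm : m < arr.length) :
    pvCnt arr (m+1) = pvCnt arr m + (if arr.getD m 0 == 1 then (1:Int) else 0) := by
  rw [pvCnt, pvCnt, List.take_succ]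
  rw [List.getElem?_eq_getElem hm]
  rw [List.getD_eq_getElem arr 0 hm]
  simp only [Option.toList_some, List.count_append, List.count_singleton]
  by_cases hx : arr[m] = 1 <;> simp [hx] <;> push_cast <;> ring

theorem pvCnt_top (arr : List Int) : pvCnt arr arr.length = (arr.count 1 : Int) := by
  simp [pvCnt]

theorem pvAst_succ (arr : List Int) (m : Nat) (hm : m < arr.length) :
    pvAst arr (m+1) = pvStepA (pvAst arr m) ((m:Int), arr.getD m 0) := by
  have hlen : m < (PySem.List.enumerate arr).length := by
    rw [PySem.List.length_enumerate]; exact hm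
  rw [pvAst, List.take_succ, List.getElem?_eq_getElem hlen, PySem.List.getElem_enumerate]
  simp [List.foldl_append, pvAst, List.getD_eq_getElem arr 0 hm, List.getElem?_eq_getElem hm]

theorem pvDpF_succ (ones : List Int) (m : Nat) :
    pvDpF ones (m+1) = pvDpF ones m ++ [pvInner ones (pvDpF ones m) ((m:Int)+1)] := by
  have h : ((m:Int)+1+1) = ((m:Int)+1) + 1 := by ring
  rw [pvDpF, show (((m+1:Nat)):Int) + 1 = ((m:Int)+1)+1 by push_cast; ring,
    PySem.List.pyRange_one_succ_right (by omega), List.foldl_append]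
  rfl

theorem pvFoldIteSum {a : Type} (p : a -> Prop) [DecidablePred p] (g : a -> Int) (l : List a) :
    forall init : Int, l.foldl (fun s j => if p j then s + g j else s) init
      = init + (l.map (fun j => if p j then g j else 0)).sum := by
  induction l with
  | nil => intro init; simp
  | cons x l ih =>
    intro init
    rw [List.foldl_cons, List.map_cons, List.sum_cons]
    by_cases hx : p x
    . rw [if_pos hx, if_pos hx, ih]; ring
    . rw [if_neg hx, if_neg hx, ih]; ring

theorem pvFoldCongr {a : Type} (f g : Int -> a -> Int) (l : List a)
    (h : forall x, x ∈ l -> forall s : Int, f s x = g s x) :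
    forall init : Int, l.foldl f init = l.foldl g init := by
  induction l with
  | nil => intro init; rfl
  | cons x l ih =>
    intro init
    rw [List.foldl_cons, List.foldl_cons, h x (List.mem_cons_self ..) init]
    exact ih (fun y hy s => h y (List.mem_cons_of_mem _ hy) s) (g init x)

theorem pvInner_eval (arr dp : List Int) (i : Nat) (hi : i <= arr.length) :
    pvInner (pvOnes arr) dp (i:Int) = pvBand arr dp i (pvCnt arr i - 1) := by
  rw [pvInner, PySem.List.pyRange_one]
  simp only [sub_zero, Int.toNat_natCast, zero_add]
  rw [List.foldl_map]
  have hc : forall j, j ∈ List.range i -> forall s : Int,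
      (if (PySem.List.pyGetD (pvOnes arr) (i:Int) 0 - PySem.List.pyGetD (pvOnes arr) (j:Int) 0) == 1 then
        s + PySem.List.pyGetD dp (j:Int) 0
      else s)
      = (if pvCnt arr j = pvCnt arr i - 1 then s + dp.getD j 0 else s) := by
    intro j hj s
    have hj' : j < i := List.mem_range.mp hj
    rw [PySem.List.pyGetD_natCast, PySem.List.pyGetD_natCast, PySem.List.pyGetD_natCast,
      pvOnes_getD arr i hi, pvOnes_getD arr j (by omega)]
    by_cases h : pvCnt arr j = pvCnt arr i - 1
    . rw [if_pos h, if_pos (by simp [beq_iff_eq]; omega)]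
    . rw [if_neg h, if_neg (by simp [beq_iff_eq]; omega)]
  refine (pvFoldCongr _ _ _ hc 0).trans ?_
  rw [pvFoldIteSum (fun j => pvCnt arr j = pvCnt arr i - 1) (fun j => dp.getD j 0) (List.range i)]
  rw [pvBand]
  ring

theorem pvBand_append (arr dp : List Int) (d : Int) (i : Nat) (v : Int) (h : i <= dp.length) :
    pvBand arr (dp ++ [d]) i v = pvBand arr dp i v := by
  rw [pvBand, pvBand]
  congr 1
  apply List.map_congr_left
  intro j hj
  have hj' : j < i := List.mem_range.mp hj
  rw [List.getD_append _ _ _ _ (by omega)]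

theorem pvBand_succ (arr dp : List Int) (i : Nat) (v : Int) :
    pvBand arr dp (i+1) v = pvBand arr dp i v + (if pvCnt arr i = v then dp.getD i 0 else 0) := by
  rw [pvBand, pvBand, List.range_succ, List.map_append, List.sum_append]
  simp

theorem pvBand_zero_of_lt (arr dp : List Int) (i : Nat) (v : Int)
    (h : forall j, j < i -> pvCnt arr j < v) : pvBand arr dp i v = 0 := by
  rw [pvBand]
  apply List.sum_eq_zero
  intro x hx
  obtain ⟨j, hj, rfl⟩ := List.mem_map.mp hx
  have := h j (List.mem_range.mp hj)
  rw [if_neg (by omega)]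

-- the master invariant: B's dp list vs A's loop state, by induction over processed prefixes
theorem pvInv (arr : List Int) : forall m, m <= arr.length ->
    (pvDpF (pvOnes arr) m).length = m + 1 ∧
    (pvDpF (pvOnes arr) m).getD m 0
      = (if pvCnt arr m = 0 then (if m = 0 then 1 else 0) else (pvAst arr m).2) ∧
    pvBand arr (pvDpF (pvOnes arr) m) (m+1) (pvCnt arr m - 1)
      = (if pvCnt arr m = 0 then 0 else (pvAst arr m).2) ∧
    pvBand arr (pvDpF (pvOnes arr) m) (m+1) (pvCnt arr m)
      = (if pvCnt arr m = 0 then 1 else ((m:Int) - (pvAst arr m).1) * (pvAst arr m).2) ∧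
    (pvCnt arr m = 0 -> pvAst arr m = (-1, 1)) ∧
    (1 <= pvCnt arr m -> 0 <= (pvAst arr m).1) := by
  intro m
  induction m with
  | zero =>
    intro _
    have hdp : pvDpF (pvOnes arr) 0 = [1] := by
      rw [pvDpF]
      norm_num [PySem.List.pyRange_one_eq_nil]
    have hc : pvCnt arr 0 = 0 := by simp [pvCnt]
    have ha : pvAst arr 0 = (-1, 1) := by simp [pvAst]
    refine ⟨by simp [hdp], ?_, ?_, ?_, fun _ => ha, by simp [hc]⟩
    . simp [hdp, hc]
    . simp [hdp, hc, pvBand, pvCnt]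
    . simp [hdp, hc, pvBand, pvCnt]
  | succ m ih =>
    intro hm1
    have hm : m < arr.length := by omega
    obtain ⟨I1, I2, I3, I4, I5, I6⟩ := ih (by omega)
    set dp := pvDpF (pvOnes arr) m with hdpdef
    set d := pvInner (pvOnes arr) dp ((m:Int)+1) with hddef
    have hstep : pvDpF (pvOnes arr) (m+1) = dp ++ [d] := pvDpF_succ _ m
    have hdcast : ((m:Int)+1) = ((m+1:Nat):Int) := by push_cast; ring
    have hd : d = pvBand arr dp (m+1) (pvCnt arr (m+1) - 1) := by
      rw [hddef, hdcast, pvInner_eval arr dp (m+1) (by omega)]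
    have hcs := pvCnt_succ arr m hm
    have hast := pvAst_succ arr m hm
    have hc0 : 0 <= pvCnt arr m := pvCnt_nonneg arr m
    have hlen' : (dp ++ [d]).length = (m+1) + 1 := by simp [I1]
    have hget : (dp ++ [d]).getD (m+1) 0 = d := by
      rw [List.getD_eq_getElem _ _ (by omega)]
      rw [List.getElem_append_right (by omega)]
      simp [I1]
    -- band sums over the extended list
    have hb1 : forall v : Int, pvBand arr (dp ++ [d]) ((m+1)+1) v
        = pvBand arr dp (m+1) v + (if pvCnt arr (m+1) = v then d else 0) := by
      intro v
      rw [pvBand_succ, pvBand_append arr dp d (m+1) v (by omega), hget]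
    by_cases hx : arr.getD m 0 == 1
    . -- the (m+1)-th element is a 1
      have hx1 : arr.getD m 0 = 1 := by rwa [beq_iff_eq] at hx
      have hcs1 : pvCnt arr (m+1) = pvCnt arr m + 1 := by rw [hcs, if_pos hx]
      have hd' : d = pvBand arr dp (m+1) (pvCnt arr m) := by rw [hd, hcs1]; ring_nf
      have hbhigh : pvBand arr dp (m+1) (pvCnt arr m + 1) = 0 := by
        apply pvBand_zero_of_lt
        intro j hj
        have := pvCnt_mono arr (show j <= m by omega)
        omega
      by_cases hz : pvCnt arr m = 0
      . -- first 1 of the array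
        have ha : pvAst arr m = (-1, 1) := I5 hz
        have hast' : pvAst arr (m+1) = ((m:Int), 1) := by
          rw [hast, ha]
          simp only [pvStepA]
          rw [hx1]
          norm_num
        have hdval : d = 1 := by rw [hd', I4, if_pos hz]
        refine ⟨by rw [hstep]; exact hlen', ?_, ?_, ?_, by intro h0; omega, ?_⟩
        . rw [hstep, hget, hdval, if_neg (by omega), hast']
        . rw [hstep, hb1, hcs1, add_sub_cancel_right]
          rw [if_neg (by omega), I4, if_pos hz, if_neg (by omega), hast']
          ring
        . rw [hstep, hb1, hcs1, hbhigh, if_pos rfl, hdval, if_neg (by omega), hast']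
          push_cast; ring
        . intro _; rw [hast']; positivity
      . -- a later 1: A multiplies in the gap
        have hzc : 1 <= pvCnt arr m := by omega
        have hprev : 0 <= (pvAst arr m).1 := I6 hzc
        have hast' : pvAst arr (m+1) = ((m:Int), (pvAst arr m).2 * ((m:Int) - (pvAst arr m).1)) := by
          rw [hast]
          simp only [pvStepA]
          rw [hx1]
          norm_num
          intro h
          exact absurd h (by omega)
        have hdval : d = ((m:Int) - (pvAst arr m).1) * (pvAst arr m).2 := by
          rw [hd', I4, if_neg hz]
        refine ⟨by rw [hstep]; exact hlen', ?_, ?_, ?_, by intro h0; omega, ?_⟩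
        . rw [hstep, hget, hdval, if_neg (by omega), hast']; ring
        . rw [hstep, hb1, hcs1, add_sub_cancel_right]
          rw [if_neg (by omega), I4, if_neg hz, if_neg (by omega), hast']
          ring
        . rw [hstep, hb1, hcs1, hbhigh, if_pos rfl, hdval, if_neg (by omega), hast']
          push_cast; ring
        . intro _; rw [hast']; positivity
    . -- the (m+1)-th element is not a 1: everything carries over
      have hcs0 : pvCnt arr (m+1) = pvCnt arr m := by rw [hcs, if_neg hx]; ring
      have hxb : (arr.getD m 0 == 1) = false := eq_false_of_ne_true hx
      have hast' : pvAst arr (m+1) = pvAst arr m := by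
        rw [hast]
        simp only [pvStepA, hxb]
        norm_num
      have hd' : d = pvBand arr dp (m+1) (pvCnt arr m - 1) := by rw [hd, hcs0]
      by_cases hz : pvCnt arr m = 0
      . have hdval : d = 0 := by rw [hd', I3, if_pos hz]
        refine ⟨by rw [hstep]; exact hlen', ?_, ?_, ?_, ?_, ?_⟩
        . rw [hstep, hget, hdval, hcs0, if_pos hz, if_neg (by omega)]
        . rw [hstep, hb1, hcs0, if_neg (by omega), I3, if_pos hz, if_pos hz]; ring
        . rw [hstep, hb1, hcs0, if_pos rfl, hdval, I4, if_pos hz, if_pos hz]; ring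
        . intro _; rw [hast']; exact I5 hz
        . intro h1; rw [hcs0] at h1; omega
      . have hdval : d = (pvAst arr m).2 := by rw [hd', I3, if_neg hz]
        refine ⟨by rw [hstep]; exact hlen', ?_, ?_, ?_, by intro h0; rw [hcs0] at h0; omega, ?_⟩
        . rw [hstep, hget, hdval, hcs0, if_neg hz, hast']
        . rw [hstep, hb1, hcs0, if_neg (by omega), I3, if_neg hz, if_neg hz, hast']; ring
        . rw [hstep, hb1, hcs0, if_pos rfl, hdval, I4, if_neg hz, if_neg hz, hast']
          push_cast; ring
        . intro _; rw [hast']; exact I6 (by omega)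

-- B's port in terms of pvOnes / pvDpF
theorem pvAlt_eq (arr : List Int) : count_subarrays_with_one_one_alt arr =
    if (pvCnt arr arr.length == 0) then 0
    else PySem.List.pyGetD (pvDpF (pvOnes arr) arr.length) (-1) 0 := by
  have hones : arr.foldl
      (fun o x => o ++ [PySem.List.pyGetD o (-1) 0 + (if x == 1 then (1:Int) else 0)]) [(0:Int)]
      = pvOnes arr := by
    have := pvOnesFold arr [] 0
    simpa [pvOnes] using this
  simp only [count_subarrays_with_one_one_alt, hones, pvOnes_last]
  simp only [pvDpF, pvInner, PySem.List.len_eq]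

-- ===== VERDICT (by name: the statement is the Claim_ definition above) =====
theorem count_subarrays_with_one_one_spec : Claim_equal_count_subarrays_with_one_one := by
  intro arr _
  unfold Spec_count_subarrays_with_one_one
  rw [pvAlt_eq, count_subarrays_with_one_one]
  have hct : pvCnt arr arr.length = (arr.count 1 : Int) := pvCnt_top arr
  by_cases hc : arr.count 1 = 0
  . rw [if_pos (Or.inr (by simp [PySem.List.count, hc])), if_pos (by simp [hct, hc])]
  . have hne : arr ≠ [] := by rintro rfl; simp at hc
    rw [if_neg (by simp [PySem.List.count, hc, hne]), if_neg (by simp [hct, hc])]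
    have hfold : (PySem.List.pyRange 0 (PySem.List.len arr) 1).foldl
        (fun (st : Int × Int) i =>
          if PySem.List.pyGetD arr i 0 == 1 then
            (i, if st.1 ≠ -1 then st.2 * (i - st.1) else st.2)
          else st) (-1, 1)
        = (PySem.List.enumerate arr).foldl pvStepA (-1, 1) := by
      rw [PySem.List.enumerate_eq_map_pyRange (d := 0), List.foldl_map]
      rfl
    have htake : (PySem.List.enumerate arr).take arr.length = PySem.List.enumerate arr :=
      List.take_of_length_le (by simp [PySem.List.length_enumerate])
    obtain ⟨I1, I2, _⟩ := pvInv arr arr.length (le_refl _)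
    have hdpne : pvDpF (pvOnes arr) arr.length ≠ [] := by
      intro h; rw [h] at I1; simp at I1
    rw [PySem.List.pyGetD_neg_one _ 0 hdpne, List.getLast_eq_getElem, hfold]
    have hA : (List.foldl pvStepA (-1, 1) (PySem.List.enumerate arr)).2 = (pvAst arr arr.length).2 := by
      rw [pvAst, htake]
    have hI2 := I2
    rw [if_neg (by rw [hct]; simp [hc] : ¬ pvCnt arr arr.length = 0)] at hI2
    rw [hA, ← hI2, List.getD_eq_getElem _ 0 (by omega)]
    congr 1
    omega
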